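-- pv_equiv track=rewrite | github.com/toki866/ApexTraderAI | tools/check_leak_alignment.py | _detect_pos_col
-- ===== SOURCE A (Python) =====
-- from typing import List, Optional, Tuple, Dict
--
-- def _detect_pos_col(cols: List[str]) -> Optional[str]:
--     for c in cols:
--         if c.lower() in ("pos_prev", "posprev", "position_prev", "prev_pos"):
--             return c  # special: pos_prev exists; handled separately
--     for c in cols:
--         if c.lower() in ("pos", "position", "pos_ratio", "ratio", "weight", "w"):
--             return c
--     for c in cols:
--         if "pos" in c.lower():
--             return c
--     return None
-- ===== SOURCE B (Python) =====
-- from typing import List, Optional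
--
-- def _detect_pos_col(cols: List[str]) -> Optional[str]:
--     # single pass: rank each column (1 = prev-pos names, 2 = pos/ratio/weight names,
--     # 3 = any name containing "pos"); keep the first column of the lowest rank seen
--     best = None  # (rank, column)
--     for c in cols:
--         lc = c.lower()
--         if lc in ("pos_prev", "posprev", "position_prev", "prev_pos"):
--             r = 1
--         elif lc in ("pos", "position", "pos_ratio", "ratio", "weight", "w"):
--             r = 2
--         elif "pos" in lc:
--             r = 3
--         else:
--             continue
--         if best is None or r < best[0]:
--             best = (r, c)
--     return None if best is None else best[1]
-- ===== Notes on version B (the rewrite author's own statement) =====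
-- stated objective: simpler
-- what changed: Replaces A's three sequential scans of cols with one pass that ranks each column (1/2/3) and keeps the earliest column of the strictly lowest rank.
import Mathlib
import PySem

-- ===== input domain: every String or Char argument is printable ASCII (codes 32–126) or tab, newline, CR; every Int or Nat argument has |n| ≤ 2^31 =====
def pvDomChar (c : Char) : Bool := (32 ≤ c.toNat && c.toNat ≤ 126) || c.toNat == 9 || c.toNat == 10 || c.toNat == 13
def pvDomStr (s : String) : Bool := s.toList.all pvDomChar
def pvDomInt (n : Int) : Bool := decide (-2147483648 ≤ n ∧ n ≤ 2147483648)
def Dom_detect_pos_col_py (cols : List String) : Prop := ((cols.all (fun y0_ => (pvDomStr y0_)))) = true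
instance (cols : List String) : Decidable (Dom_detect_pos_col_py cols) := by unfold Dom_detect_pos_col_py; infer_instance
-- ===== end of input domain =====

-- B replaces A's three sequential scans with one ranked pass (simpler decomposition; same O(n) cost).

-- ===== PORT A =====
def pvTuple1 : List String := ["pos_prev", "posprev", "position_prev", "prev_pos"]
def pvTuple2 : List String := ["pos", "position", "pos_ratio", "ratio", "weight", "w"]

-- first loop: `if c.lower() in ("pos_prev", ...): return c`
def pvA_loop1 : List String → Option String
  | [] => none
  | c :: rest => if pvTuple1.contains (PySem.Str.lower c) then some c else pvA_loop1 rest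

-- second loop: `if c.lower() in ("pos", ...): return c`
def pvA_loop2 : List String → Option String
  | [] => none
  | c :: rest => if pvTuple2.contains (PySem.Str.lower c) then some c else pvA_loop2 rest

-- third loop: `if "pos" in c.lower(): return c`
def pvA_loop3 : List String → Option String
  | [] => none
  | c :: rest => if PySem.Str.isIn "pos" (PySem.Str.lower c) then some c else pvA_loop3 rest

def detect_pos_col_py (cols : List String) : Option String :=
  match pvA_loop1 cols with
  | some c => some c
  | none =>
    match pvA_loop2 cols with
    | some c => some c
    | none => pvA_loop3 cols

-- ===== PORT B =====
-- rank of a column: 1/2/3 as in Source B, none = skip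
def pvTier (c : String) : Option Nat :=
  let lc := PySem.Str.lower c
  if pvTuple1.contains lc then some 1
  else if pvTuple2.contains lc then some 2
  else if PySem.Str.isIn "pos" lc then some 3
  else none

-- the single pass carrying `best` = (rank, column)
def pvB_loop : List String → Option (Nat × String) → Option (Nat × String)
  | [], best => best
  | c :: rest, best =>
    match pvTier c with
    | none => pvB_loop rest best
    | some r =>
      match best with
      | none => pvB_loop rest (some (r, c))
      | some (br, bc) =>
        if r < br then pvB_loop rest (some (r, c)) else pvB_loop rest (some (br, bc))

def detect_pos_col_py_alt (cols : List String) : Option String :=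
  (pvB_loop cols none).map Prod.snd

-- ===== PRECONDITION & SPEC =====
def Spec_detect_pos_col_py (cols : List String) (out : Option String) : Prop := out = detect_pos_col_py_alt cols
instance (cols : List String) (out : Option String) : Decidable (Spec_detect_pos_col_py cols out) := by unfold Spec_detect_pos_col_py; infer_instance

-- ===== CLAIM (what is proved, stated in full; the proofs are below) =====
def Claim_equal_detect_pos_col_py : Prop := ∀ (cols : List String), Dom_detect_pos_col_py cols → Spec_detect_pos_col_py cols (detect_pos_col_py cols)

-- ===== LEMMAS AND PROOFS =====

-- left-biased min-by-rank merge of two `best` states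
def pvMerge (b q : Option (Nat × String)) : Option (Nat × String) :=
  match b, q with
  | none, q => q
  | some p, none => some p
  | some p, some q => if q.1 < p.1 then some q else some p

def pvEntry (c : String) : Option (Nat × String) := (pvTier c).map (fun r => (r, c))

lemma pvMerge_none_right (b : Option (Nat × String)) : pvMerge b none = b := by
  cases b <;> rfl

lemma pvMerge_assoc (a b c : Option (Nat × String)) :
    pvMerge (pvMerge a b) c = pvMerge a (pvMerge b c) := by
  rcases a with _ | ⟨ar, ac⟩
  · rfl
  rcases b with _ | ⟨br, bc⟩
  · rfl
  rcases c with _ | ⟨cr, cc⟩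
  · rw [pvMerge_none_right, pvMerge_none_right]
  · by_cases h1 : br < ar <;> by_cases h2 : cr < br <;> by_cases h3 : cr < ar <;>
      simp [pvMerge, h1, h2, h3] <;> omega

lemma pvB_loop_step (c : String) (rest : List String) (b : Option (Nat × String)) :
    pvB_loop (c :: rest) b = pvB_loop rest (pvMerge b (pvEntry c)) := by
  rcases h : pvTier c with _ | r <;> rcases b with _ | ⟨br, bc⟩ <;>
    simp only [pvB_loop, pvMerge, pvEntry, h, Option.map_none, Option.map_some]
  split_ifs <;> rfl

lemma pvB_loop_merge (cols : List String) (b : Option (Nat × String)) :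
    pvB_loop cols b = pvMerge b (pvB_loop cols none) := by
  induction cols generalizing b with
  | nil => cases b <;> rfl
  | cons c rest ih =>
    have hn : pvMerge none (pvEntry c) = pvEntry c := rfl
    rw [pvB_loop_step, pvB_loop_step, hn, ih, ih (pvEntry c), pvMerge_assoc]

-- characterisation of A's three passes as a ranked result
def pvCharac (cols : List String) : Option (Nat × String) :=
  match pvA_loop1 cols with
  | some c => some (1, c)
  | none =>
    match pvA_loop2 cols with
    | some c => some (2, c)
    | none => (pvA_loop3 cols).map (fun c => (3, c))

lemma pvB_loop_eq_charac (cols : List String) : pvB_loop cols none = pvCharac cols := by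
  induction cols with
  | nil => rfl
  | cons c rest ih =>
    rw [pvB_loop_step]
    have hn : pvMerge none (pvEntry c) = pvEntry c := rfl
    rw [hn, pvB_loop_merge, ih]
    by_cases h1 : PySem.Str.lower c ∈ pvTuple1 <;>
      by_cases h2 : PySem.Str.lower c ∈ pvTuple2 <;>
        by_cases h3 : PySem.Chars.isIn ['p', 'o', 's'] (PySem.Chars.lower c.toList) = true <;>
          rcases e1 : pvA_loop1 rest with _ | d1 <;>
            rcases e2 : pvA_loop2 rest with _ | d2 <;>
              rcases e3 : pvA_loop3 rest with _ | d3 <;>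
                simp [pvCharac, pvA_loop1, pvA_loop2, pvA_loop3, pvEntry, pvTier,
                  pvMerge, h1, h2, h3, e1, e2, e3]

lemma pvA_eq_charac_snd (cols : List String) :
    detect_pos_col_py cols = (pvCharac cols).map Prod.snd := by
  unfold detect_pos_col_py pvCharac
  rcases pvA_loop1 cols with _ | d1 <;> rcases pvA_loop2 cols with _ | d2 <;>
    rcases pvA_loop3 cols with _ | d3 <;> simp

-- ===== VERDICT (by name: the statement is the Claim_ definition above) =====
theorem detect_pos_col_py_spec : Claim_equal_detect_pos_col_py := by
  intro cols _
  unfold Spec_detect_pos_col_py detect_pos_col_py_alt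
  rw [pvB_loop_eq_charac, pvA_eq_charac_snd]
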